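-- pv_equiv track=rewrite | github.com/viorato/compute_rational_links_genus | computeGenus.py | get_even_contiuned_fraction
-- ===== SOURCE A (Python) =====
-- def get_even_contiuned_fraction(a,b):
--     """ Find the continued fraction [0, 2a_1, 2a_2, ..., 2a_k] of the rational a/b
--     """
--     if  b<0:
--         b = (-1)*b
--         a = (-1)*a
--     if b == 1:
--         return [a]
--     elif b > a and a > (-1)*b :
--         return [0]+get_even_contiuned_fraction(b,a)
--     else:
--         q, r = divmod(a,b)
--         if q%2 ==0:
--             return [q]+get_even_contiuned_fraction(b,r)
--         else:
--             return [q+1]+get_even_contiuned_fraction((-1)*b,b-r)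
-- ===== SOURCE B (Python) =====
-- def get_even_contiuned_fraction(a, b):
--     """Even continued fraction of a/b via one uniform division step:
--     normalize the sign once up front, then repeatedly round the floor
--     quotient up to the next even integer; an odd quotient flips the sign
--     of the next remainder pair (which keeps the denominator positive)."""
--     if b < 0:
--         a, b = -a, -b
--     res = []
--     while b != 1:
--         q = a // b
--         c = q + q % 2          # round quotient up to even
--         s = 1 - 2 * (q % 2)    # sign flip after an odd quotient
--         res.append(c)
--         a, b = s * b, s * (a - c * b)
--     res.append(a)
--     return res
-- ===== Notes on version B (the rewrite author's own statement) =====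
-- stated objective: alternative
-- what changed: Replaced A's recursion with three branches (b==1 base, 0-insert swap for |a|<b, parity split on the quotient) by an iterative single-step loop that normalizes the sign once up front and then applies one uniform rule: round the floor quotient up to even and flip the sign of the next pair after an odd quotient, which subsumes A's swap and both parity branches.
import Mathlib
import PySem

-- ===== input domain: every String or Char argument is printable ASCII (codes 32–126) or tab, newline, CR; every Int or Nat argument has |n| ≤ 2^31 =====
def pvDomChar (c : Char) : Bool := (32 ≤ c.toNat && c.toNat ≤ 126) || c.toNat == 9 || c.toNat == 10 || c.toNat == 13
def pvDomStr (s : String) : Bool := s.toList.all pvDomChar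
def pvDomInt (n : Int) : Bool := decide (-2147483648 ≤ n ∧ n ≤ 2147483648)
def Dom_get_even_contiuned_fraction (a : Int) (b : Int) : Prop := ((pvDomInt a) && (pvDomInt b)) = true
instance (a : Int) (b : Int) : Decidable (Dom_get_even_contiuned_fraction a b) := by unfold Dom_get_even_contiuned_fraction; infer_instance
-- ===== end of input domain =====

-- B replaces A's recursion with its three-way branch (b==1 base case, 0-insert swap, parity split
-- on the quotient) by an iterative loop with ONE uniform step: normalize the sign once up front,
-- then round the floor quotient up to even and flip the sign of the next pair after an odd
-- quotient; alternative decomposition, no speed claim.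
-- Both Pythons are partial (A raises / recurses forever outside Pre_ below, B then loops), so both
-- ports carry a fuel counter large enough for every terminating input in Dom; fuel exhaustion is
-- never reached inside Pre_.

-- ===== PORT A =====
-- fuel bound shared by both ports; the coefficient count is < 2·(|a|+|b|)+2 ≤ 2^34 on Dom
def pvFuel : Nat := 68719476736

-- literal transliteration of A's recursion (fuel only makes it total)
def pvGecfRec : Nat → Int → Int → List Int
  | 0, _, _ => []
  | fuel + 1, a, b =>
    let a := if b < 0 then -a else a
    let b := if b < 0 then -b else b
    if b = 1 then [a]
    else if b > a ∧ a > -b then 0 :: pvGecfRec fuel b a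
    else
      let q := PySem.Int.floordiv a b
      let r := PySem.Int.mod a b
      if PySem.Int.mod q 2 = 0 then q :: pvGecfRec fuel b r
      else (q + 1) :: pvGecfRec fuel (-b) (b - r)

def get_even_contiuned_fraction (a : Int) (b : Int) : List Int := pvGecfRec pvFuel a b

-- ===== PORT B =====
-- literal transliteration of Source B's while-loop (`res` is the accumulator list)
def pvGecfStep : Nat → List Int → Int → Int → List Int
  | 0, res, _, _ => res
  | fuel + 1, res, a, b =>
    if b ≠ 1 then
      let q := PySem.Int.floordiv a b
      let c := q + PySem.Int.mod q 2
      let s := 1 - 2 * PySem.Int.mod q 2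
      pvGecfStep fuel (res ++ [c]) (s * b) (s * (a - c * b))
    else res ++ [a]

def get_even_contiuned_fraction_alt (a : Int) (b : Int) : List Int :=
  let a' := if b < 0 then -a else a
  let b' := if b < 0 then -b else b
  pvGecfStep pvFuel [] a' b'

-- ===== PRECONDITION & SPEC =====
-- Pre_ admits exactly the inputs on which Python A returns: with b = 0 or gcd(a,b) ≠ 1 A hits a
-- zero divisor (ZeroDivisionError) or repeats a state forever (RecursionError).
def Pre_get_even_contiuned_fraction (a : Int) (b : Int) : Prop := b ≠ 0 ∧ Int.gcd a b = 1
instance (a : Int) (b : Int) : Decidable (Pre_get_even_contiuned_fraction a b) := by unfold Pre_get_even_contiuned_fraction; infer_instance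

def pvWitness_get_even_contiuned_fraction : Int × Int := (7, 5)

def Spec_get_even_contiuned_fraction (a : Int) (b : Int) (out : List Int) : Prop := out = get_even_contiuned_fraction_alt a b
instance (a : Int) (b : Int) (out : List Int) : Decidable (Spec_get_even_contiuned_fraction a b out) := by unfold Spec_get_even_contiuned_fraction; infer_instance

-- ===== CLAIM (what is proved, stated in full; the proofs are below) =====
def Claim_equal_get_even_contiuned_fraction : Prop := ∀ (a : Int) (b : Int), Dom_get_even_contiuned_fraction a b → Pre_get_even_contiuned_fraction a b → Spec_get_even_contiuned_fraction a b (get_even_contiuned_fraction a b)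

-- ===== LEMMAS AND PROOFS =====
-- A's re-normalization is invisible when the denominator is already positive, and a doubly
-- negated state is the same state:
lemma pvGecfRec_neg (fuel : Nat) (a b : Int) (hb : b < 0) :
    pvGecfRec fuel a b = pvGecfRec fuel (-a) (-b) := by
  cases fuel with
  | zero => rfl
  | succ n =>
    simp only [pvGecfRec, if_pos hb, if_neg (show ¬ (-b) < 0 by omega)]

-- key invariant: for a positive denominator and a coprime pair, B's uniform step produces, behind
-- the accumulator, exactly A's recursion (branch by branch, fuel step for fuel step)
lemma pvGecfStep_eq_rec (fuel : Nat) : ∀ (res : List Int) (a b : Int),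
    0 < b → Int.gcd a b = 1 →
    pvGecfStep fuel res a b = res ++ pvGecfRec fuel a b := by
  induction fuel with
  | zero => intro res a b _ _; simp [pvGecfStep, pvGecfRec]
  | succ n ih =>
    intro res a b hb hg
    have hbn : ¬ b < 0 := by omega
    by_cases hb1 : b = 1
    · subst hb1
      simp [pvGecfStep, pvGecfRec]
    · have hb2 : 2 ≤ b := by omega
      simp only [pvGecfStep, pvGecfRec, if_neg hbn, if_neg hb1, if_pos hb1]
      set q := PySem.Int.floordiv a b with hq
      set r := PySem.Int.mod a b with hr
      have hqr : q * b + r = a := PySem.Int.floordiv_mul_add_mod a b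
      have hr0 : 0 ≤ r := PySem.Int.mod_nonneg a hb
      have hrb : r < b := PySem.Int.mod_lt a hb
      -- r ≠ 0: otherwise b divides a and gcd a b = b ≥ 2
      have hrne : r ≠ 0 := by
        intro h0
        have hdvd : b ∣ a := (PySem.Int.mod_eq_zero_iff_dvd a b).1 (hr ▸ h0)
        have := Int.gcd_eq_natAbs_right hdvd
        omega
      -- gcd bookkeeping: gcd b r = gcd a b
      have hgbr : Int.gcd b r = 1 := by
        have ha : a = r + q * b := by linear_combination - hqr
        calc Int.gcd b r = Int.gcd b (r + q * b) := (Int.gcd_add_mul_right_right b r q).symm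
          _ = Int.gcd a b := by rw [← ha, Int.gcd_comm]
          _ = 1 := hg
      have hq2 : PySem.Int.mod q 2 = 0 ∨ PySem.Int.mod q 2 = 1 := by
        have := PySem.Int.mod_nonneg q (show (0:Int) < 2 by omega)
        have := PySem.Int.mod_lt q (show (0:Int) < 2 by omega)
        omega
      rcases hq2 with hev | hod
      · -- even quotient: subsumes A's swap branch (then a ≥ 0) and A's even branch
        rw [hev]
        have e1 : (1 - 2 * (0:Int)) * b = b := by ring
        have e2 : (1 - 2 * (0:Int)) * (a - (q + 0) * b) = r := by linear_combination - hqr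
        rw [e1, e2, add_zero]
        by_cases hmid : b > a ∧ a > -b
        · -- here 0 ≤ a < b (a < 0 would make q = -1, odd), so q = 0 and r = a
          have hane : a ≠ 0 := by
            intro h; subst h
            have := Int.gcd_zero_left b
            omega
          have hq0 : q = 0 := by
            rcases lt_or_ge a 0 with hneg | hpos
            · exfalso
              have : q = -1 := by
                rw [hq]
                exact (PySem.Int.floordiv_eq_iff_of_pos hb).2 ⟨by nlinarith [hmid.2], by nlinarith⟩
              rw [this] at hev; exact absurd hev (by decide)
            · rw [hq]
              exact (PySem.Int.floordiv_eq_iff_of_pos hb).2 ⟨by nlinarith, by nlinarith [hmid.1]⟩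
          have hra : r = a := by linear_combination hqr - b * hq0
          rw [if_pos hmid, hq0, hra]
          rw [ih (res ++ [0]) b a (by omega) (by rw [Int.gcd_comm]; exact hg)]
          simp
        · rw [if_neg hmid, if_pos rfl]
          rw [ih (res ++ [q]) b r (by omega) hgbr]
          simp
      · -- odd quotient: subsumes A's swap branch (then a < 0) and A's odd branch
        rw [hod]
        have e1 : (1 - 2 * (1:Int)) * b = -b := by ring
        have e2 : (1 - 2 * (1:Int)) * (a - (q + 1) * b) = b - r := by linear_combination hqr
        rw [e1, e2]
        have hgodd : Int.gcd (-b) (b - r) = 1 := by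
          have hbr : b - r = -r + 1 * b := by ring
          rw [Int.neg_gcd, hbr, Int.gcd_add_mul_right_right b (-r) 1, Int.gcd_neg]
          exact hgbr
        by_cases hmid : b > a ∧ a > -b
        · -- here -b < a < 0 (a ≥ 0 would make q = 0, even), so q = -1 and b - r = -a
          have haneg : a < 0 := by
            by_contra h
            have : q = 0 := by
              rw [hq]
              exact (PySem.Int.floordiv_eq_iff_of_pos hb).2 ⟨by nlinarith, by nlinarith [hmid.1]⟩
            rw [this] at hod; exact absurd hod (by decide)
          have hqm1 : q = -1 := by
            rw [hq]
            exact (PySem.Int.floordiv_eq_iff_of_pos hb).2 ⟨by nlinarith [hmid.2], by nlinarith⟩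
          have hbra : b - r = -a := by linear_combination - hqr + b * hqm1
          have hc0 : q + 1 = 0 := by omega
          rw [if_pos hmid, hc0, hbra]
          rw [ih (res ++ [0]) (-b) (-a) (by omega) (by rw [Int.neg_gcd, Int.gcd_neg, Int.gcd_comm]; exact hg)]
          rw [pvGecfRec_neg n b a haneg]
          simp
        · rw [if_neg hmid, if_neg (show ¬ (1:Int) = 0 by decide)]
          rw [ih (res ++ [q + 1]) (-b) (b - r) (by omega) hgodd]
          simp

-- ===== VERDICT (by name: the statement is the Claim_ definition above) =====
theorem get_even_contiuned_fraction_spec : Claim_equal_get_even_contiuned_fraction := by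
  intro a b _ hpre
  obtain ⟨hb0, hg⟩ := hpre
  unfold Spec_get_even_contiuned_fraction get_even_contiuned_fraction get_even_contiuned_fraction_alt
  rcases lt_or_gt_of_ne hb0 with hneg | hpos
  · rw [pvGecfRec_neg pvFuel a b hneg]
    simp only [if_pos hneg]
    rw [pvGecfStep_eq_rec pvFuel [] (-a) (-b) (by omega) (by rw [Int.neg_gcd, Int.gcd_neg]; exact hg)]
    simp
  · simp only [if_neg (show ¬ b < 0 by omega)]
    rw [pvGecfStep_eq_rec pvFuel [] a b hpos hg]
    simp
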